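-- pv_equiv track=rewrite | github.com/Raldir/FEVEROUS | src/feverous/utils/prepare_model_input.py | get_evidence_by_page
-- ===== SOURCE A (Python) =====
-- def get_evidence_by_page(evidence):
--     evidence_by_page = {}
--     for ele in evidence:
--         page = ele.split("_")[0]
--         if page in evidence_by_page:
--             evidence_by_page[page].append(ele)
--         else:
--             evidence_by_page[page] = [ele]
--     return [list(values) for key, values in evidence_by_page.items()]
-- ===== SOURCE B (Python) =====
-- def get_evidence_by_page(evidence):
--     pages = []
--     for ele in evidence:
--         page = ele.split("_")[0]
--         if page not in pages:
--             pages.append(page)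
--     return [[ele for ele in evidence if ele.split("_")[0] == page] for page in pages]
-- ===== Notes on version B (the rewrite author's own statement) =====
-- stated objective: alternative
-- what changed: Replaces the incremental dict-of-lists accumulation with a two-phase scheme: first collect the distinct page prefixes in first-appearance order, then build each group by filtering the evidence list per page.
import Mathlib
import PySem

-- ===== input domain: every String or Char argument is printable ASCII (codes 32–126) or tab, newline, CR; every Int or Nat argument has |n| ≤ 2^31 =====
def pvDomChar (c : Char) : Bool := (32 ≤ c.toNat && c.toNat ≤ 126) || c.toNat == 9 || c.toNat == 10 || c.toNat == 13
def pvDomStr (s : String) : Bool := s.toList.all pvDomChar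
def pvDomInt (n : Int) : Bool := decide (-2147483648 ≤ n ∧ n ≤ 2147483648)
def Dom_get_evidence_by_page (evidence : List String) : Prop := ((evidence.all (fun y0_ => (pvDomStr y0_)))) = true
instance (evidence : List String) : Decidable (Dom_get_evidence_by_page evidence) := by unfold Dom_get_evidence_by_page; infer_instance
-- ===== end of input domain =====

-- B replaces A's incremental dict-of-lists grouping by first collecting the distinct
-- page prefixes in order and then filtering the evidence list once per page (alternative decomposition).


-- ===== PORT A =====
-- ele.split("_")[0]: split? with nonempty separator is always 'some' of a nonempty list,
-- so the [0] index never raises; the .getD defaults are unreachable.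
def pvPageOf (ele : String) : String :=
  (PySem.List.pyGet? ((PySem.Str.split? ele "_").getD []) 0).getD ""

def get_evidence_by_page (evidence : List String) : List (List String) :=
  let d := evidence.foldl
    (fun d ele =>
      let page := pvPageOf ele
      if d.contains page then d.modify page [] (fun v => v ++ [ele])
      else d.insert page [ele])
    PySem.Dict.empty
  d.items.map (fun kv => kv.2)

-- ===== PORT B =====
def get_evidence_by_page_alt (evidence : List String) : List (List String) :=
  let pages := evidence.foldl
    (fun acc ele =>
      let page := pvPageOf ele
      if acc.contains page then acc else acc ++ [page])
    ([] : List String)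
  pages.map (fun page => evidence.filter (fun ele => pvPageOf ele == page))

-- ===== PRECONDITION & SPEC =====
def Spec_get_evidence_by_page (evidence : List String) (out : List (List String)) : Prop := out = get_evidence_by_page_alt evidence
instance (evidence : List String) (out : List (List String)) : Decidable (Spec_get_evidence_by_page evidence out) := by unfold Spec_get_evidence_by_page; infer_instance

-- ===== CLAIM (what is proved, stated in full; the proofs are below) =====
def Claim_equal_get_evidence_by_page : Prop := ∀ (evidence : List String), Dom_get_evidence_by_page evidence → Spec_get_evidence_by_page evidence (get_evidence_by_page evidence)

-- ===== LEMMAS AND PROOFS =====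

-- A's branchy step (append if present, fresh singleton otherwise) is exactly Dict.modify.
theorem pvStepA_eq_modify (d : PySem.Dict String (List String)) (ele : String) :
    (if d.contains (pvPageOf ele) then d.modify (pvPageOf ele) [] (fun v => v ++ [ele])
     else d.insert (pvPageOf ele) [ele])
    = d.modify (pvPageOf ele) [] (fun v => v ++ [ele]) := by
  by_cases h : d.contains (pvPageOf ele) = true
  · simp [h]
  · simp only [Bool.not_eq_true] at h
    simp [h, PySem.Dict.modify, PySem.Dict.getD_of_not_contains _ _ h]

theorem pvFoldA_eq_modify (l : List String) (d : PySem.Dict String (List String)) :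
    l.foldl (fun d ele =>
      if d.contains (pvPageOf ele) then d.modify (pvPageOf ele) [] (fun v => v ++ [ele])
      else d.insert (pvPageOf ele) [ele]) d
    = l.foldl (fun d ele => d.modify (pvPageOf ele) [] (fun v => v ++ [ele])) d := by
  induction l generalizing d with
  | nil => rfl
  | cons x xs ih => simp only [List.foldl_cons, pvStepA_eq_modify, ih]

-- B's page-collecting loop is the ordered dedup of the prefixes.
theorem pvPages_eq_ofList (l : List String) :
    l.foldl (fun acc ele => if acc.contains (pvPageOf ele) then acc else acc ++ [pvPageOf ele])
      ([] : List String)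
    = PySem.Set.ofList (l.map pvPageOf) := by
  rw [← PySem.Set.update_nil_left, PySem.Set.update_map_eq_foldl_add]
  rfl

-- each bucket of the modify-fold dict is the filter of the input by that page.
theorem pvGetD_fold (l : List String) (c : String) :
    (l.foldl (fun d ele => d.modify (pvPageOf ele) [] (fun v => v ++ [ele]))
      (PySem.Dict.empty : PySem.Dict String (List String))).getD c []
    = l.filter (fun e => pvPageOf e == c) := by
  have h : (l.foldl (fun d ele => d.modify (pvPageOf ele) [] (fun v => v ++ [ele]))
      (PySem.Dict.empty : PySem.Dict String (List String)))
      = (l.map (fun e => (pvPageOf e, e))).foldl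
          (fun d p => d.modify p.1 [] (fun v => v ++ [p.2])) PySem.Dict.empty := by
    rw [List.foldl_map]
  rw [h, PySem.Dict.getD_foldl_modify_append]
  simp [PySem.Dict.getD_empty, List.filter_map, Function.comp_def]

-- ===== VERDICT (by name: the statement is the Claim_ definition above) =====
theorem get_evidence_by_page_spec : Claim_equal_get_evidence_by_page := by
  intro evidence _
  unfold Spec_get_evidence_by_page get_evidence_by_page get_evidence_by_page_alt
  simp only []
  rw [pvFoldA_eq_modify, pvPages_eq_ofList]
  have hnd : (evidence.foldl (fun d ele => d.modify (pvPageOf ele) [] (fun v => v ++ [ele]))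
      (PySem.Dict.empty : PySem.Dict String (List String))).keys.Nodup := by
    have := PySem.Dict.nodup_keys_foldl_modify_key evidence pvPageOf []
      (fun _ ele v => v ++ [ele]) PySem.Dict.empty (by simp [PySem.Dict.keys_empty])
    simpa using this
  have hkeys : (evidence.foldl (fun d ele => d.modify (pvPageOf ele) [] (fun v => v ++ [ele]))
      (PySem.Dict.empty : PySem.Dict String (List String))).keys
      = PySem.Set.ofList (evidence.map pvPageOf) := by
    have := PySem.Dict.keys_foldl_modify_key evidence pvPageOf []
      (fun _ ele v => v ++ [ele]) PySem.Dict.empty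
    simpa [PySem.Dict.keys_empty, PySem.Set.update_nil_left] using this
  rw [PySem.Dict.items_eq_map_keys _ hnd [], hkeys, List.map_map]
  simp only [pvGetD_fold, Function.comp_def]
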